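-- pv_equiv track=rewrite | github.com/BenTibi55/Memory | affiche_grid.py | affiche_1case
-- ===== SOURCE A (Python) =====
-- def grid_to_string_with_size(grid, n, m):
--     # affiche la grille de la bonne taille
--     # grid est une liste de listes, n et m entiers
--     # renvoie une chaîne de caractères
--     string_grille = ""
--     string_grille += "=== "*m
--     string_grille += "\n"
--     for k in range(n):
--         for i in range(m):
--             string_grille += "|"+str(grid[k][i])+"| "
--         string_grille += "\n"
--         string_grille += "=== "*m
--         string_grille += "\n"
--     return string_grille
--
-- def affiche_1case(grid, pos1):
--     # pos1 est un tuple
--     # prend en arguments la grille de jeu (liste de listes) et la position de la case à révéler.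
--     # renvoie la grille de jeu (chaîne de caractères)
--     n = len(grid)
--     m = len(grid[0])
--     L = []
--     for i in range(0, n):
--         M = []
--         for j in range(0, m):
--             if (i, j) == pos1:
--                 M.append(grid[i][j])  # affiche la carte à révéler
--             elif grid[i][j] == " ":
--                 M.append(" ")  # espace dans les cases vides
--             else:
--                 M.append("X")  # x pour les cartes face cachée
--         L.append(M)
--     return grid_to_string_with_size(L, n, m)
-- ===== SOURCE B (Python) =====
-- def affiche_1case(grid, pos1):
--     m = len(grid[0])
--     sep = "=== " * m
--     parts = [sep]
--     for i, row in enumerate(grid):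
--         line = "".join(
--             "|" + (cell if (i, j) == pos1 else " " if cell == " " else "X") + "| "
--             for j, cell in enumerate(row[:m])
--         )
--         parts.append(line)
--         parts.append(sep)
--     return "\n".join(parts) + "\n"
-- ===== Notes on version B (the rewrite author's own statement) =====
-- stated objective: simpler
-- what changed: B drops the intermediate masked list-of-lists and the separate grid_to_string_with_size rendering pass: it builds the output in a single pass over the rows, joining header/row parts with newline and masking each cell inline.
import Mathlib
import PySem

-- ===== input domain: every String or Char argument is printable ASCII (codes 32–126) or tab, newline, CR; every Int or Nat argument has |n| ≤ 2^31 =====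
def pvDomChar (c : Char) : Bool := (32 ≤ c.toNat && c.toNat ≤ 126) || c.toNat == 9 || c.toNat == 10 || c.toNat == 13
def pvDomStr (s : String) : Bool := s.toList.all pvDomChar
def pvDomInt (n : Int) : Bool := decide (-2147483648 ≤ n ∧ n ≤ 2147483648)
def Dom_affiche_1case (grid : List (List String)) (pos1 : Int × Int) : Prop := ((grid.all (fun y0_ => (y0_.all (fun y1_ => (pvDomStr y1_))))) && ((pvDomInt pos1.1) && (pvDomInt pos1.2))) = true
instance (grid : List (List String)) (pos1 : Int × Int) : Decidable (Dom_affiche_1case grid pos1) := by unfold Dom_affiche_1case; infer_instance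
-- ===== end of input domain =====

-- B builds the output string in one pass over the rows (masking each cell inline and joining
-- header/row parts with newline) instead of A's intermediate masked list-of-lists plus a second
-- rendering pass; objective: simpler. Neither version mutates its arguments.

-- ===== PORT A =====
-- helper: grid_to_string_with_size; strings are built on List Char (PySem convention)
def pvGridToStringWithSize (grid : List (List String)) (n m : Int) : List Char :=
  let sep := PySem.List.pyRepeat "=== ".toList m
  let s0 : List Char := [] ++ sep ++ ['\n']
  (PySem.List.pyRange 0 n).foldl
    (fun s k =>
      ((PySem.List.pyRange 0 m).foldl
        (fun s i =>
          s ++ ['|'] ++ (PySem.List.pyGetD (PySem.List.pyGetD grid k []) i "").toList ++ ['|', ' ']) s)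
      ++ ['\n'] ++ sep ++ ['\n'])
    s0

def affiche_1case (grid : List (List String)) (pos1 : Int × Int) : String :=
  let n : Int := grid.length
  let m : Int := (PySem.List.pyGetD grid 0 []).length
  let L : List (List String) :=
    (PySem.List.pyRange 0 n).foldl
      (fun L i =>
        let M : List String :=
          (PySem.List.pyRange 0 m).foldl
            (fun M j =>
              let cell := PySem.List.pyGetD (PySem.List.pyGetD grid i []) j ""
              if (i, j) = pos1 then M ++ [cell]
              else if cell = " " then M ++ [" "]
              else M ++ ["X"]) []
        L ++ [M]) []
  String.ofList (pvGridToStringWithSize L n m)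

-- ===== PORT B =====
-- helper: the rendered characters of one cell, mask computed inline
def pvMask (pos1 : Int × Int) (i j : Int) (cell : String) : List Char :=
  '|' :: (if (i, j) = pos1 then cell.toList else if cell = " " then [' '] else ['X']) ++ ['|', ' ']

def affiche_1case_alt (grid : List (List String)) (pos1 : Int × Int) : String :=
  let m : Int := (PySem.List.pyGetD grid 0 []).length
  let sep := PySem.List.pyRepeat "=== ".toList m
  let parts : List (List Char) :=
    (PySem.List.enumerate grid).foldl
      (fun ps p =>
        let line := PySem.Chars.join []
          ((PySem.List.enumerate (PySem.List.slice p.2 none (some m))).map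
            (fun q => pvMask pos1 p.1 q.1 q.2))
        ps ++ [line, sep]) [sep]
  String.ofList (PySem.Chars.join ['\n'] parts ++ ['\n'])

-- ===== PRECONDITION & SPEC =====
-- Pre_ excludes exactly the inputs on which the Python A raises IndexError: the empty grid
-- (grid[0]) and grids with some row shorter than the first row (grid[i][j], j < m).
def Pre_affiche_1case (grid : List (List String)) (pos1 : Int × Int) : Prop :=
  grid ≠ [] ∧ ∀ row ∈ grid, (grid.headD []).length ≤ row.length
instance (grid : List (List String)) (pos1 : Int × Int) : Decidable (Pre_affiche_1case grid pos1) := by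
  unfold Pre_affiche_1case; infer_instance

def pvWitness_affiche_1case : List (List String) × (Int × Int) := ([[" ", "A"], ["B", "C"]], (0, 1))

def Spec_affiche_1case (grid : List (List String)) (pos1 : Int × Int) (out : String) : Prop := out = affiche_1case_alt grid pos1
instance (grid : List (List String)) (pos1 : Int × Int) (out : String) : Decidable (Spec_affiche_1case grid pos1 out) := by unfold Spec_affiche_1case; infer_instance

-- ===== CLAIM (what is proved, stated in full; the proofs are below) =====
def Claim_equal_affiche_1case : Prop := ∀ (grid : List (List String)) (pos1 : Int × Int), Dom_affiche_1case grid pos1 → Pre_affiche_1case grid pos1 → Spec_affiche_1case grid pos1 (affiche_1case grid pos1)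

-- ===== LEMMAS AND PROOFS =====

-- A's masked cell as a string (what A stores in the intermediate grid L)
def pvMaskStr (pos1 : Int × Int) (i j : Int) (cell : String) : String :=
  if (i, j) = pos1 then cell else if cell = " " then " " else "X"

-- A's cell rendering applied to A's masked cell is exactly B's inline mask
theorem pv_piece_mask (pos1 : Int × Int) (i j : Int) (cell : String) :
    ['|'] ++ (pvMaskStr pos1 i j cell).toList ++ ['|', ' '] = pvMask pos1 i j cell := by
  unfold pvMaskStr pvMask
  split_ifs <;> rfl

-- a fold over range(len xs) whose body reads xs[j] is a fold over enumerate(xs)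
theorem pv_foldl_enum {α β : Type} (xs : List α) (d : α) (F : β → Int → α → β) (init : β) :
    (PySem.List.pyRange 0 (xs.length : Int)).foldl (fun acc j => F acc j (PySem.List.pyGetD xs j d)) init
      = (PySem.List.enumerate xs).foldl (fun acc p => F acc p.1 p.2) init := by
  rw [PySem.List.enumerate_eq_map_pyRange xs d, List.foldl_map]; rfl

-- the map version of the same fact
theorem pv_map_enum {α β : Type} (xs : List α) (d : α) (F : Int → α → β) :
    (PySem.List.pyRange 0 (xs.length : Int)).map (fun j => F j (PySem.List.pyGetD xs j d))
      = (PySem.List.enumerate xs).map (fun p => F p.1 p.2) := by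
  rw [PySem.List.enumerate_eq_map_pyRange xs d, List.map_map]; rfl

theorem pv_getD_take {α : Type} (xs : List α) (k : Nat) (d : α) {j : Int}
    (h0 : 0 ≤ j) (h1 : j < (k : Int)) (hk : k ≤ xs.length) :
    PySem.List.pyGetD (xs.take k) j d = PySem.List.pyGetD xs j d := by
  have hjk : j.toNat < k := by omega
  rw [PySem.List.pyGetD_eq_getElem _ d h0 (by simp; omega),
      PySem.List.pyGetD_eq_getElem _ d h0 (by exact_mod_cast lt_of_lt_of_le h1 (by exact_mod_cast hk))]
  exact List.getElem_take

-- "".join(ps) is concatenation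
theorem pv_join_nil (ps : List (List Char)) : PySem.Chars.join [] ps = ps.flatten := by
  induction ps with
  | nil => simp [PySem.Chars.join_nil]
  | cons p ps ih =>
    cases ps with
    | nil => simp [PySem.Chars.join_singleton]
    | cons q rest => rw [PySem.Chars.join_cons_cons]; simp at ih ⊢; rw [ih]

-- B's "\n".join(sep :: [line, sep] per row) + "\n" in A's appended shape
theorem pv_join_shape {α : Type} (sep : List Char) (f : α → List Char) (E : List α) :
    ∀ s, PySem.Chars.join ['\n'] (s :: E.flatMap (fun x => [f x, sep])) ++ ['\n']
      = s ++ '\n' :: E.flatMap (fun x => f x ++ '\n' :: sep ++ ['\n']) := by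
  induction E with
  | nil => intro s; simp [PySem.Chars.join_singleton]
  | cons x E ih =>
    intro s
    have h2 := PySem.Chars.join_cons_cons ['\n'] s (f x) ((sep :: E.flatMap (fun x => [f x, sep])))
    have h3 := PySem.Chars.join_cons_cons ['\n'] (f x) sep (E.flatMap (fun x => [f x, sep]))
    have h4 := ih sep
    simp only [List.flatMap_cons, List.cons_append, List.nil_append]
    rw [h2, h3]
    rw [List.append_assoc, List.append_assoc, List.append_assoc, h4]
    simp

-- B equals the canonical flatMap form
theorem pvB (grid : List (List String)) (pos1 : Int × Int) (r : List String) (rest : List (List String))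
    (hg : grid = r :: rest) (hrows : ∀ row ∈ grid, r.length ≤ row.length) :
    affiche_1case_alt grid pos1 =
      String.ofList (PySem.List.pyRepeat "=== ".toList (r.length : Int) ++ '\n' ::
        (PySem.List.enumerate grid).flatMap
          (fun p => ((PySem.List.enumerate (p.2.take r.length)).map (fun q => pvMask pos1 p.1 q.1 q.2)).flatten
            ++ '\n' :: PySem.List.pyRepeat "=== ".toList (r.length : Int) ++ ['\n'])) := by
  subst hg
  have hm0 : PySem.List.pyGetD (r :: rest) 0 ([] : List String) = r := by
    rw [PySem.List.pyGetD_of_nonneg _ _ le_rfl]; rfl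
  have hsl : ∀ (row : List String), PySem.List.slice row none (some (r.length : Int)) = row.take r.length := by
    intro row; rw [PySem.List.slice_to row (Int.natCast_nonneg r.length)]; simp
  simp only [affiche_1case_alt, hm0, hsl, pv_join_nil]
  rw [PySem.List.foldl_append_eq_flatMap
        (fun p : Int × List String => [((PySem.List.enumerate (p.2.take r.length)).map (fun q => pvMask pos1 p.1 q.1 q.2)).flatten,
            PySem.List.pyRepeat "=== ".toList (r.length : Int)])
        (PySem.List.enumerate (r :: rest)) [PySem.List.pyRepeat "=== ".toList (r.length : Int)],
      List.singleton_append,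
      pv_join_shape (PySem.List.pyRepeat "=== ".toList (r.length : Int))
        (fun p : Int × List String => ((PySem.List.enumerate (p.2.take r.length)).map (fun q => pvMask pos1 p.1 q.1 q.2)).flatten)
        (PySem.List.enumerate (r :: rest))]

-- A's rendering pass on a rectangular grid, as a flatMap
theorem pvRender (L : List (List String)) (m' : Nat) (hM : ∀ M ∈ L, M.length = m') :
    pvGridToStringWithSize L (L.length : Int) (m' : Int) =
      PySem.List.pyRepeat "=== ".toList (m' : Int) ++ '\n' ::
        L.flatMap (fun M => M.flatMap (fun cell => ['|'] ++ cell.toList ++ ['|', ' '])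
          ++ '\n' :: PySem.List.pyRepeat "=== ".toList (m' : Int) ++ ['\n']) := by
  simp only [pvGridToStringWithSize]
  rw [pv_foldl_enum L ([] : List String)
      (fun s k row => ((PySem.List.pyRange 0 (m' : Int)).foldl
        (fun s i => s ++ ['|'] ++ (PySem.List.pyGetD row i "").toList ++ ['|', ' ']) s)
        ++ ['\n'] ++ PySem.List.pyRepeat "=== ".toList (m' : Int) ++ ['\n'])]
  rw [PySem.List.foldl_congr_mem _ _
      (fun (s : List Char) (p : Int × List String) =>
        s ++ (p.2.flatMap (fun cell => ['|'] ++ cell.toList ++ ['|', ' '])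
          ++ '\n' :: PySem.List.pyRepeat "=== ".toList (m' : Int) ++ ['\n'])) _ ?_]
  · rw [PySem.List.foldl_append_eq_flatMap
        (fun (p : Int × List String) =>
          p.2.flatMap (fun cell => ['|'] ++ cell.toList ++ ['|', ' '])
            ++ '\n' :: PySem.List.pyRepeat "=== ".toList (m' : Int) ++ ['\n'])]
    conv_rhs => rw [← PySem.List.map_snd_enumerate L 0, List.flatMap_map]
    simp
  · intro acc p hp
    have hmem : p.2 ∈ L := by
      rw [← PySem.List.map_snd_enumerate L 0]; exact List.mem_map_of_mem hp
    have hlen : ((p.2.length : Nat) : Int) = (m' : Int) := by rw [hM p.2 hmem]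
    rw [← hlen]
    rw [show ((p.2.length : Nat) : Int) = PySem.List.len p.2 from rfl,
        PySem.List.foldl_pyRange_pyGetD p.2 ""
          (fun s cell => s ++ ['|'] ++ cell.toList ++ ['|', ' ']) acc (le_refl 0)]
    simp only [Int.toNat_zero, List.drop_zero]
    have : ∀ (M : List String) (acc : List Char),
        M.foldl (fun s cell => s ++ ['|'] ++ cell.toList ++ ['|', ' ']) acc
          = acc ++ M.flatMap (fun cell => ['|'] ++ cell.toList ++ ['|', ' ']) := by
      intro M acc
      rw [← PySem.List.foldl_append_eq_flatMap (fun (cell : String) => ['|'] ++ cell.toList ++ ['|', ' '])]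
      exact PySem.List.foldl_congr_mem _ _ _ _ (by intro a x _; simp)
    rw [this]
    simp

-- A equals the same canonical flatMap form
theorem pvA (pos1 : Int × Int) (r : List String) (rest : List (List String))
    (hrows : ∀ row ∈ (r :: rest), r.length ≤ row.length) :
    affiche_1case (r :: rest) pos1 =
      String.ofList (PySem.List.pyRepeat "=== ".toList (r.length : Int) ++ '\n' ::
        (PySem.List.enumerate (r :: rest)).flatMap
          (fun p => ((PySem.List.enumerate (p.2.take r.length)).map (fun q => pvMask pos1 p.1 q.1 q.2)).flatten
            ++ '\n' :: PySem.List.pyRepeat "=== ".toList (r.length : Int) ++ ['\n'])) := by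
  have hm0 : PySem.List.pyGetD (r :: rest) 0 ([] : List String) = r := by
    rw [PySem.List.pyGetD_of_nonneg _ _ le_rfl]; rfl
  have hIf : ∀ (M : List String) (i j : Int) (cell : String),
      (if (i, j) = pos1 then M ++ [cell] else if cell = " " then M ++ [" "] else M ++ ["X"])
        = M ++ [pvMaskStr pos1 i j cell] := by
    intro M i j cell; unfold pvMaskStr; split_ifs <;> rfl
  simp only [affiche_1case, hm0, hIf, PySem.List.foldl_append_singleton_eq_map, List.nil_append]
  rw [pv_map_enum (r :: rest) ([] : List String)
      (fun i row => (PySem.List.pyRange 0 (r.length : Int)).map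
        (fun j => pvMaskStr pos1 i j (PySem.List.pyGetD row j "")))]
  have hL : (PySem.List.enumerate (r :: rest)).map
        (fun p => (PySem.List.pyRange 0 (r.length : Int)).map
          (fun j => pvMaskStr pos1 p.1 j (PySem.List.pyGetD p.2 j "")))
      = (PySem.List.enumerate (r :: rest)).map
        (fun p => (PySem.List.enumerate (p.2.take r.length)).map
          (fun q => pvMaskStr pos1 p.1 q.1 q.2)) := by
    refine List.map_congr_left ?_
    intro p hp
    have hmem : p.2 ∈ (r :: rest) := by
      rw [← PySem.List.map_snd_enumerate (r :: rest) 0]; exact List.mem_map_of_mem hp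
    have hlen : r.length ≤ p.2.length := hrows _ hmem
    have htake : ((p.2.take r.length).length : Int) = (r.length : Int) := by
      simp; omega
    rw [← pv_map_enum (p.2.take r.length) "" (fun j cell => pvMaskStr pos1 p.1 j cell), htake]
    refine List.map_congr_left ?_
    intro j hj
    rw [PySem.List.mem_pyRange_one] at hj
    rw [pv_getD_take p.2 r.length "" hj.1 hj.2 hlen]
  rw [hL]
  have hlenL : (((r :: rest) : List (List String)).length : Int)
      = (((PySem.List.enumerate (r :: rest)).map
          (fun p => (PySem.List.enumerate (p.2.take r.length)).map
            (fun q => pvMaskStr pos1 p.1 q.1 q.2))).length : Int) := by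
    simp [PySem.List.length_enumerate]
  rw [hlenL, pvRender _ r.length ?_]
  · simp only [List.flatMap_map, pv_piece_mask, ← List.flatMap_def]
  · intro M hM
    obtain ⟨p, hp, rfl⟩ := List.mem_map.mp hM
    have hmem : p.2 ∈ (r :: rest) := by
      rw [← PySem.List.map_snd_enumerate (r :: rest) 0]; exact List.mem_map_of_mem hp
    have hlen : r.length ≤ p.2.length := hrows _ hmem
    simp [PySem.List.length_enumerate]
    omega

theorem affiche_1case_main : ∀ (grid : List (List String)) (pos1 : Int × Int),
    Pre_affiche_1case grid pos1 → affiche_1case grid pos1 = affiche_1case_alt grid pos1 := by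
  intro grid pos1 hpre
  obtain ⟨hne, hrows⟩ := hpre
  cases grid with
  | nil => exact absurd rfl hne
  | cons r rest =>
    have hrows' : ∀ row ∈ (r :: rest), r.length ≤ row.length := by simpa using hrows
    rw [pvA pos1 r rest hrows', pvB (r :: rest) pos1 r rest rfl hrows']

-- ===== VERDICT (by name: the statement is the Claim_ definition above) =====
theorem affiche_1case_spec : Claim_equal_affiche_1case := by
  intro grid pos1 _ hpre
  exact affiche_1case_main grid pos1 hpre
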